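-- pv_equiv track=rewrite | github.com/j0ons/Sounrunner | app/engine/aggregation.py | _highest_criticality
-- ===== SOURCE A (Python) =====
-- def _highest_criticality(values: list[str]) -> str:
--     rank = {"critical": 4, "high": 3, "medium": 2, "low": 1}
--     highest = ""
--     highest_rank = 0
--     for value in values:
--         current_rank = rank.get(value, 0)
--         if current_rank > highest_rank:
--             highest = value
--             highest_rank = current_rank
--     return highest
-- ===== SOURCE B (Python) =====
-- def _highest_criticality(values: list[str]) -> str:
--     for level in ("critical", "high", "medium", "low"):
--         if level in values:
--             return level
--     return ""
-- ===== Notes on version B (the rewrite author's own statement) =====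
-- stated objective: idiomatic
-- what changed: Instead of scanning the values while tracking a running best rank, B iterates over the four criticality levels in descending priority and returns the first one present in the values (membership probe), with "" if none is present.
import Mathlib
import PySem

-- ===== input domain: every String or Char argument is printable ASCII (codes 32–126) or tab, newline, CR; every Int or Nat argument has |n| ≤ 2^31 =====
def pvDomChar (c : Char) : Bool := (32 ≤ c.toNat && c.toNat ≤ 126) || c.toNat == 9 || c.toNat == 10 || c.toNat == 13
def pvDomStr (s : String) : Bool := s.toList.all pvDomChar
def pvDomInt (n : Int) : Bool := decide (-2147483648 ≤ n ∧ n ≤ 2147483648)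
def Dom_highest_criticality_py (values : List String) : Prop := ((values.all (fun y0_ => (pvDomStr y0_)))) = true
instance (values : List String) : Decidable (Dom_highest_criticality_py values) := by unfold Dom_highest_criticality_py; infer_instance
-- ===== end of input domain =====

-- B replaces A's running-max scan over the values by a probe over the four levels in
-- descending priority, returning the first level present (idiomatic; same O(n) cost).

-- ===== PORT A =====
def highest_criticality_py (values : List String) : String :=
  let rank : PySem.Dict String Int :=
    PySem.Dict.ofList [("critical", 4), ("high", 3), ("medium", 2), ("low", 1)]
  let st := values.foldl (fun (st : String × Int) value =>
    let current_rank := rank.getD value 0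
    if current_rank > st.2 then (value, current_rank) else st) ("", 0)
  st.1

-- ===== PORT B =====
def highest_criticality_py_alt (values : List String) : String :=
  match (["critical", "high", "medium", "low"] : List String).find?
      (fun level => values.contains level) with
  | some level => level
  | none => ""

-- ===== PRECONDITION & SPEC =====
def Spec_highest_criticality_py (values : List String) (out : String) : Prop := out = highest_criticality_py_alt values
instance (values : List String) (out : String) : Decidable (Spec_highest_criticality_py values out) := by unfold Spec_highest_criticality_py; infer_instance

-- ===== CLAIM (what is proved, stated in full; the proofs are below) =====
def Claim_equal_highest_criticality_py : Prop := ∀ (values : List String), Dom_highest_criticality_py values → Spec_highest_criticality_py values (highest_criticality_py values)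

-- ===== LEMMAS AND PROOFS =====

-- rank of a value in A's dict (proof-side abbreviation)
def pvRk (v : String) : Int :=
  (PySem.Dict.ofList [("critical", 4), ("high", 3), ("medium", 2), ("low", 1)] :
    PySem.Dict String Int).getD v 0

theorem pvRk_eq (v : String) :
    pvRk v = if v = "critical" then 4 else if v = "high" then 3
      else if v = "medium" then 2 else if v = "low" then 1 else 0 := by
  have hd : (PySem.Dict.ofList [("critical", 4), ("high", 3), ("medium", 2), ("low", 1)] :
      PySem.Dict String Int)
      = PySem.Dict.mk [("critical", 4), ("high", 3), ("medium", 2), ("low", 1)] := by decide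
  rw [pvRk, hd]
  simp only [PySem.Dict.getD, PySem.Dict.get?]
  have e : ∀ w, v ≠ w → ((w == v) = false) := fun w h => beq_eq_false_iff_ne.mpr (Ne.symm h)
  split_ifs with h1 h2 h3 h4
  · simp [List.find?, h1]
  · simp [List.find?, h2]
  · simp [List.find?, h3]
  · simp [List.find?, h4]
  · simp [List.find?, e _ h1, e _ h2, e _ h3, e _ h4]

theorem pvRk_nonneg (v : String) : 0 ≤ pvRk v := by
  rw [pvRk_eq]; split_ifs <;> norm_num

theorem pvRk_le (v : String) : pvRk v ≤ 4 := by
  rw [pvRk_eq]; split_ifs <;> norm_num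

-- maximum rank occurring in the list
def pvM (vs : List String) : Int := vs.foldr (fun v acc => max (pvRk v) acc) 0

theorem pvM_nonneg (vs : List String) : 0 ≤ pvM vs := by
  induction vs with
  | nil => simp [pvM]
  | cons v vs ih => simp only [pvM, List.foldr] at *; omega

theorem pvM_le (vs : List String) : pvM vs ≤ 4 := by
  induction vs with
  | nil => simp [pvM]
  | cons v vs ih => have := pvRk_le v; simp only [pvM, List.foldr] at *; omega

-- the level name of a positive rank
def pvName (n : Int) : String :=
  if n = 4 then "critical" else if n = 3 then "high"
  else if n = 2 then "medium" else if n = 1 then "low" else ""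

theorem pvName_rk (v : String) (h : 0 < pvRk v) : pvName (pvRk v) = v := by
  rw [pvRk_eq] at *
  split_ifs at * <;> simp_all [pvName]

theorem pvM_cons (v : String) (vs : List String) :
    pvM (v :: vs) = max (pvRk v) (pvM vs) := rfl

-- characterization of A's fold from any reachable state (h, pvRk h)
theorem pvFold_char (vs : List String) (h : String) :
    (vs.foldl (fun (st : String × Int) value =>
      if pvRk value > st.2 then (value, pvRk value) else st) (h, pvRk h)).1
    = if pvRk h < pvM vs then pvName (pvM vs) else h := by
  induction vs generalizing h with
  | nil =>
    have := pvRk_nonneg h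
    have hM0 : pvM ([] : List String) = 0 := rfl
    simp only [List.foldl, hM0]
    rw [if_neg (by omega)]
  | cons v vs ih =>
    have hv := pvRk_nonneg v
    have hh := pvRk_nonneg h
    have hM := pvM_nonneg vs
    rw [List.foldl_cons]
    have hstep : (if pvRk v > (h, pvRk h).2 then (v, pvRk v) else (h, pvRk h))
        = if pvRk v > pvRk h then (v, pvRk v) else (h, pvRk h) := rfl
    rw [hstep, pvM_cons]
    by_cases hc : pvRk v > pvRk h
    · rw [if_pos hc, ih v]
      by_cases h2 : pvRk v < pvM vs
      · rw [if_pos h2, if_pos (by omega)]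
        congr 1; omega
      · rw [if_neg h2, if_pos (by omega)]
        have hmax : max (pvRk v) (pvM vs) = pvRk v := by omega
        rw [hmax, pvName_rk v (by omega)]
    · rw [if_neg hc, ih h]
      by_cases h2 : pvRk h < pvM vs
      · rw [if_pos h2, if_pos (by omega)]
        congr 1; omega
      · rw [if_neg h2, if_neg (by omega)]

theorem pvA_char (values : List String) :
    highest_criticality_py values
    = if 0 < pvM values then pvName (pvM values) else "" := by
  have h0 : pvRk "" = 0 := by decide
  have h := pvFold_char values ""
  rw [h0] at h
  exact h

-- membership ↔ rank-threshold lemmas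
theorem pvM_ge (k : Int) (hk : 0 < k) (vs : List String) :
    k ≤ pvM vs ↔ ∃ v ∈ vs, k ≤ pvRk v := by
  induction vs with
  | nil => simp [pvM]; omega
  | cons v vs ih =>
    simp only [pvM, List.foldr] at *
    constructor
    · intro h
      rcases le_max_iff.mp h with h | h
      · exact ⟨v, List.mem_cons_self, h⟩
      · obtain ⟨w, hw, hkw⟩ := ih.mp h
        exact ⟨w, List.mem_cons_of_mem _ hw, hkw⟩
    · rintro ⟨w, hw, hkw⟩
      rcases List.mem_cons.mp hw with rfl | hw
      · exact le_max_iff.mpr (Or.inl hkw)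
      · exact le_max_iff.mpr (Or.inr (ih.mpr ⟨w, hw, hkw⟩))

theorem pvRk_ge4 (v : String) : 4 ≤ pvRk v ↔ v = "critical" := by
  rw [pvRk_eq]; split_ifs <;> simp_all
theorem pvRk_ge3 (v : String) : 3 ≤ pvRk v ↔ v = "critical" ∨ v = "high" := by
  rw [pvRk_eq]; split_ifs <;> simp_all
theorem pvRk_ge2 (v : String) : 2 ≤ pvRk v ↔ v = "critical" ∨ v = "high" ∨ v = "medium" := by
  rw [pvRk_eq]; split_ifs <;> simp_all
theorem pvRk_ge1 (v : String) : 1 ≤ pvRk v ↔ v = "critical" ∨ v = "high" ∨ v = "medium" ∨ v = "low" := by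
  rw [pvRk_eq]; split_ifs <;> simp_all

theorem pvM4 (vs : List String) : 4 ≤ pvM vs ↔ "critical" ∈ vs := by
  rw [pvM_ge 4 (by norm_num)]
  constructor
  · rintro ⟨v, hv, h⟩; rwa [(pvRk_ge4 v).mp h] at hv
  · intro h; exact ⟨_, h, (pvRk_ge4 _).mpr rfl⟩
theorem pvM3 (vs : List String) : 3 ≤ pvM vs ↔ "critical" ∈ vs ∨ "high" ∈ vs := by
  rw [pvM_ge 3 (by norm_num)]
  constructor
  · rintro ⟨v, hv, h⟩
    rcases (pvRk_ge3 v).mp h with rfl | rfl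
    · exact Or.inl hv
    · exact Or.inr hv
  · rintro (h | h)
    · exact ⟨_, h, (pvRk_ge3 _).mpr (Or.inl rfl)⟩
    · exact ⟨_, h, (pvRk_ge3 _).mpr (Or.inr rfl)⟩
theorem pvM2 (vs : List String) : 2 ≤ pvM vs ↔ "critical" ∈ vs ∨ "high" ∈ vs ∨ "medium" ∈ vs := by
  rw [pvM_ge 2 (by norm_num)]
  constructor
  · rintro ⟨v, hv, h⟩
    rcases (pvRk_ge2 v).mp h with rfl | rfl | rfl
    · exact Or.inl hv
    · exact Or.inr (Or.inl hv)
    · exact Or.inr (Or.inr hv)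
  · rintro (h | h | h)
    · exact ⟨_, h, (pvRk_ge2 _).mpr (Or.inl rfl)⟩
    · exact ⟨_, h, (pvRk_ge2 _).mpr (Or.inr (Or.inl rfl))⟩
    · exact ⟨_, h, (pvRk_ge2 _).mpr (Or.inr (Or.inr rfl))⟩
theorem pvM1 (vs : List String) : 1 ≤ pvM vs ↔ "critical" ∈ vs ∨ "high" ∈ vs ∨ "medium" ∈ vs ∨ "low" ∈ vs := by
  rw [pvM_ge 1 (by norm_num)]
  constructor
  · rintro ⟨v, hv, h⟩
    rcases (pvRk_ge1 v).mp h with rfl | rfl | rfl | rfl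
    · exact Or.inl hv
    · exact Or.inr (Or.inl hv)
    · exact Or.inr (Or.inr (Or.inl hv))
    · exact Or.inr (Or.inr (Or.inr hv))
  · rintro (h | h | h | h)
    · exact ⟨_, h, (pvRk_ge1 _).mpr (Or.inl rfl)⟩
    · exact ⟨_, h, (pvRk_ge1 _).mpr (Or.inr (Or.inl rfl))⟩
    · exact ⟨_, h, (pvRk_ge1 _).mpr (Or.inr (Or.inr (Or.inl rfl)))⟩
    · exact ⟨_, h, (pvRk_ge1 _).mpr (Or.inr (Or.inr (Or.inr rfl)))⟩

theorem pvB_unfold (values : List String) :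
    highest_criticality_py_alt values
    = if "critical" ∈ values then "critical"
      else if "high" ∈ values then "high"
      else if "medium" ∈ values then "medium"
      else if "low" ∈ values then "low" else "" := by
  simp only [highest_criticality_py_alt, List.find?, List.contains]
  by_cases h1 : "critical" ∈ values <;>
    by_cases h2 : "high" ∈ values <;>
      by_cases h3 : "medium" ∈ values <;>
        by_cases h4 : "low" ∈ values <;>
          simp [h1, h2, h3, h4]

-- ===== VERDICT (by name: the statement is the Claim_ definition above) =====
theorem highest_criticality_py_spec : Claim_equal_highest_criticality_py := by
  intro values _
  unfold Spec_highest_criticality_py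
  rw [pvA_char, pvB_unfold]
  have hle := pvM_le values
  have hge := pvM_nonneg values
  by_cases h1 : "critical" ∈ values
  · have : pvM values = 4 := by have := (pvM4 values).mpr h1; omega
    simp [this, h1, pvName]
  · have hn4 : ¬ 4 ≤ pvM values := fun h => h1 ((pvM4 values).mp h)
    by_cases h2 : "high" ∈ values
    · have : pvM values = 3 := by have := (pvM3 values).mpr (Or.inr h2); omega
      simp [this, h1, h2, pvName]
    · have hn3 : ¬ 3 ≤ pvM values := fun h => by
        rcases (pvM3 values).mp h with h | h <;> [exact h1 h; exact h2 h]
      by_cases h3 : "medium" ∈ values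
      · have : pvM values = 2 := by have := (pvM2 values).mpr (Or.inr (Or.inr h3)); omega
        simp [this, h1, h2, h3, pvName]
      · have hn2 : ¬ 2 ≤ pvM values := fun h => by
          rcases (pvM2 values).mp h with h | h | h <;> [exact h1 h; exact h2 h; exact h3 h]
        by_cases h4 : "low" ∈ values
        · have : pvM values = 1 := by
            have := (pvM1 values).mpr (Or.inr (Or.inr (Or.inr h4))); omega
          simp [this, h1, h2, h3, h4, pvName]
        · have hn1 : ¬ 1 ≤ pvM values := fun h => by
            rcases (pvM1 values).mp h with h | h | h | h <;>
              [exact h1 h; exact h2 h; exact h3 h; exact h4 h]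
          have : pvM values = 0 := by omega
          simp [this, h1, h2, h3, h4]
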